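-- pv_equiv track=rewrite | github.com/unohayato/algo | class.py | solution
-- ===== SOURCE A (Python) =====
-- def overlaps(a, b):
--   return b[0] < a[0] and a[0] < b[1]
--
-- def solution(classes):
--   num_classes = len(classes)
--   max_rooms = 1
--   for i in range(num_classes):
--     rooms = 1
--     for j in range(num_classes):
--       if i == j:
--         continue
--       if overlaps(classes[i], classes[j]):
--         rooms += 1
--         max_rooms = max(max_rooms, rooms)
--
--   return max_rooms
-- ===== SOURCE B (Python) =====
-- def solution(classes):
--     # Sweep line: sort (coord, kind) events with kind 0=end, 1=query(start), 2=begin,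
--     # so at each start we read off how many intervals strictly contain it.
--     events = []
--     for s, e in classes:
--         events.append((s, 1))
--         if s < e:
--             events.append((s, 2))
--             events.append((e, 0))
--     events.sort()
--     cur = 0
--     best = 1
--     for _, kind in events:
--         if kind == 0:
--             cur -= 1
--         elif kind == 1:
--             best = max(best, cur + 1)
--         else:
--             cur += 1
--     return best
-- ===== Notes on version B (the rewrite author's own statement) =====
-- stated objective: faster
-- what changed: Replaced A's O(n^2) all-pairs overlap counting per interval start by a single O(n log n) sorted sweep of (coordinate, kind) events that reads the number of strictly-containing intervals at each start.
import Mathlib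
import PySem

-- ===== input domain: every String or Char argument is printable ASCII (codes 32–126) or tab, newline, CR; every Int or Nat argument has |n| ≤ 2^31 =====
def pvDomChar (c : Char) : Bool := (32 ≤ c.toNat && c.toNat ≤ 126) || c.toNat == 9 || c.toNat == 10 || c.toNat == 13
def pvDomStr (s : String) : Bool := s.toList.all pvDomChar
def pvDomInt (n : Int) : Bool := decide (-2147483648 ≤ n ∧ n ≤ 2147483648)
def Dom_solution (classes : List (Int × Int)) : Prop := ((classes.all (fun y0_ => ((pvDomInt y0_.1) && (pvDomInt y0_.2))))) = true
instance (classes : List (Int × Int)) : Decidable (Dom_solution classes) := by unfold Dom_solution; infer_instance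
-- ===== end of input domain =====

-- B replaces A's quadratic all-pairs overlap counting by a sorted event sweep; return value only, no mutation.

-- ===== PORT A =====
def overlapsA (a b : Int × Int) : Bool := decide (b.1 < a.1) && decide (a.1 < b.2)

def solution (classes : List (Int × Int)) : Int :=
  let num_classes : Int := PySem.List.len classes
  -- indices produced by range(num_classes) are always in range, so pyGetD's default is never used
  (PySem.List.pyRange 0 num_classes).foldl
    (fun max_rooms i =>
      ((PySem.List.pyRange 0 num_classes).foldl
        (fun (p : Int × Int) j =>
          if i == j then p
          else if overlapsA (PySem.List.pyGetD classes i (0, 0)) (PySem.List.pyGetD classes j (0, 0))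
          then (p.1 + 1, max p.2 (p.1 + 1))
          else p)
        (1, max_rooms)).2)
    1

-- ===== PORT B =====
def solution_alt (classes : List (Int × Int)) : Int :=
  let events : List (Int × Int) :=
    classes.foldl
      (fun acc c =>
        let acc := acc ++ [(c.1, (1 : Int))]
        if c.1 < c.2 then acc ++ [(c.1, (2 : Int)), (c.2, (0 : Int))] else acc)
      []
  -- events.sort(): Python tuple comparison is lexicographic, i.e. the toLex order on pairs
  let events := PySem.List.sorted events (fun e => toLex e) false
  (events.foldl
    (fun (p : Int × Int) ev =>
      if ev.2 == 0 then (p.1 - 1, p.2)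
      else if ev.2 == 1 then (p.1, max p.2 (p.1 + 1))
      else (p.1 + 1, p.2))
    (0, 1)).2

-- ===== PRECONDITION & SPEC =====
def Spec_solution (classes : List (Int × Int)) (out : Int) : Prop := out = solution_alt classes
instance (classes : List (Int × Int)) (out : Int) : Decidable (Spec_solution classes out) := by unfold Spec_solution; infer_instance

-- ===== CLAIM (what is proved, stated in full; the proofs are below) =====
def Claim_equal_solution : Prop := ∀ (classes : List (Int × Int)), Dom_solution classes → Spec_solution classes (solution classes)

-- ===== LEMMAS AND PROOFS =====

-- number of intervals strictly containing the point s
def pvCover (cs : List (Int × Int)) (s : Int) : Int :=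
  (cs.countP (fun c => decide (c.1 < s) && decide (s < c.2)) : Nat)

-- the events one class contributes in B
def pvEv (c : Int × Int) : List (Int × Int) :=
  (c.1, (1 : Int)) :: (if c.1 < c.2 then [(c.1, (2 : Int)), (c.2, (0 : Int))] else [])

-- counter value a query at s reads, relative to an event list E
def pvNet (s : Int) (E : List (Int × Int)) : Int :=
  ((E.countP (fun e => e.2 == 2 && decide (e.1 < s)) : Nat) : Int)
  - ((E.countP (fun e => e.2 == 0 && decide (e.1 ≤ s)) : Nat) : Int)

def pvQ (e : Int × Int) : Option Int := if e.2 == 1 then some e.1 else none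

theorem overlapsA_self (a : Int × Int) : overlapsA a a = false := by
  simp [overlapsA]

-- A's inner loop: rooms counts the matches, max_rooms records the running max
theorem pvInnerA (cs : List (Int × Int)) (i : Int) :
    ∀ (js : List Int) (r m : Int), r ≤ m →
      js.foldl
        (fun (p : Int × Int) j =>
          if i == j then p
          else if overlapsA (PySem.List.pyGetD cs i (0, 0)) (PySem.List.pyGetD cs j (0, 0))
          then (p.1 + 1, max p.2 (p.1 + 1))
          else p)
        (r, m)
      = (r + (js.countP (fun j => !(i == j) && overlapsA (PySem.List.pyGetD cs i (0, 0)) (PySem.List.pyGetD cs j (0, 0))) : Nat),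
         max m (r + (js.countP (fun j => !(i == j) && overlapsA (PySem.List.pyGetD cs i (0, 0)) (PySem.List.pyGetD cs j (0, 0))) : Nat))) := by
  intro js
  induction js with
  | nil => intro r m h; simp only [List.foldl_nil, List.countP_nil]; simp [Prod.ext_iff]; omega
  | cons j js ih =>
    intro r m h
    simp only [List.foldl_cons, List.countP_cons]
    by_cases hij : (i == j) = true
    · simp only [hij, if_true, Bool.not_true, Bool.false_and]
      rw [ih r m h]; simp
    · simp only [hij, Bool.not_false, Bool.true_and, Bool.false_eq_true, if_false]
      by_cases hov : overlapsA (PySem.List.pyGetD cs i (0, 0)) (PySem.List.pyGetD cs j (0, 0)) = true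
      · simp only [hov, if_true]
        rw [ih (r + 1) (max m (r + 1)) (by omega)]
        simp only [Prod.ext_iff]
        exact ⟨by push_cast; omega, by push_cast; omega⟩
      · simp only [hov, Bool.false_eq_true, if_false]
        rw [ih r m h]; simp

theorem pvCountP_get {α : Type} (cs : List α) (d : α) (p : α → Bool) :
    (PySem.List.pyRange 0 (PySem.List.len cs)).countP (fun j => p (PySem.List.pyGetD cs j d))
    = cs.countP p := by
  conv_rhs => rw [← PySem.List.map_pyGetD_pyRange_zero cs d]
  rw [List.countP_map]
  rfl

-- the inner count at index i is pvCover at classes[i]'s start (j = i never matches)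
theorem pvCount_eq (cs : List (Int × Int)) (i : Int) :
    ((PySem.List.pyRange 0 (PySem.List.len cs)).countP
      (fun j => !(i == j) && overlapsA (PySem.List.pyGetD cs i (0, 0)) (PySem.List.pyGetD cs j (0, 0))) : Nat)
    = cs.countP (fun c => decide (c.1 < (PySem.List.pyGetD cs i (0, 0)).1) && decide ((PySem.List.pyGetD cs i (0, 0)).1 < c.2)) := by
  rw [List.countP_congr (q := fun j => overlapsA (PySem.List.pyGetD cs i (0, 0)) (PySem.List.pyGetD cs j (0, 0))) ?_]
  · exact pvCountP_get cs (0, 0) (fun c => overlapsA (PySem.List.pyGetD cs i (0, 0)) c)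
  · intro j _
    by_cases hij : i = j
    · subst hij
      have h := overlapsA_self (PySem.List.pyGetD cs i (0, 0))
      simp [h]
    · simp [hij]

theorem pvOuterA (cs : List (Int × Int)) :
    ∀ (l : List Int) (mr : Int), 1 ≤ mr →
      l.foldl
        (fun max_rooms i =>
          ((PySem.List.pyRange 0 (PySem.List.len cs)).foldl
            (fun (p : Int × Int) j =>
              if i == j then p
              else if overlapsA (PySem.List.pyGetD cs i (0, 0)) (PySem.List.pyGetD cs j (0, 0))
              then (p.1 + 1, max p.2 (p.1 + 1))
              else p)
            (1, max_rooms)).2)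
        mr
      = l.foldl (fun b i => max b (1 + pvCover cs (PySem.List.pyGetD cs i (0, 0)).1)) mr := by
  intro l
  induction l with
  | nil => intro mr h; rfl
  | cons i l ih =>
    intro mr h
    simp only [List.foldl_cons]
    rw [pvInnerA cs i _ 1 mr h, pvCount_eq]
    have : max mr (1 + (cs.countP (fun c => decide (c.1 < (PySem.List.pyGetD cs i (0, 0)).1) && decide ((PySem.List.pyGetD cs i (0, 0)).1 < c.2)) : Nat))
        = max mr (1 + pvCover cs (PySem.List.pyGetD cs i (0, 0)).1) := by
      simp [pvCover]
    rw [this, ih _ (by have := le_max_left mr (1 + pvCover cs (PySem.List.pyGetD cs i (0, 0)).1); omega)]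

-- A = running max over the starts of 1 + cover
theorem pvA_char (cs : List (Int × Int)) :
    solution cs = (cs.map Prod.fst).foldl (fun b s => max b (1 + pvCover cs s)) 1 := by
  show (PySem.List.pyRange 0 (PySem.List.len cs)).foldl _ 1 = _
  rw [pvOuterA cs _ 1 (le_refl 1)]
  have hl : cs.map Prod.fst
      = (PySem.List.pyRange 0 (PySem.List.len cs)).map (fun j => (PySem.List.pyGetD cs j (0, 0)).1) := by
    conv_lhs => rw [← PySem.List.map_pyGetD_pyRange_zero cs (0, 0)]
    rw [List.map_map]
    rfl
  rw [hl, List.foldl_map]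

theorem pvNet_cons (s : Int) (e : Int × Int) (E : List (Int × Int)) :
    pvNet s (e :: E) = pvNet s E
      + (if e.2 == 2 && decide (e.1 < s) then 1 else 0)
      - (if e.2 == 0 && decide (e.1 ≤ s) then 1 else 0) := by
  simp only [pvNet, List.countP_cons]
  split_ifs <;> push_cast <;> omega

-- the sweep: the fold over a lex-sorted event list is the running max over its queries
theorem pvSweep :
    ∀ (E : List (Int × Int)),
      E.Pairwise (fun a b => a.1 < b.1 ∨ (a.1 = b.1 ∧ a.2 ≤ b.2)) →
      (∀ e ∈ E, e.2 = 0 ∨ e.2 = 1 ∨ e.2 = 2) →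
      ∀ (c0 b0 : Int),
        (E.foldl
          (fun (p : Int × Int) ev =>
            if ev.2 == 0 then (p.1 - 1, p.2)
            else if ev.2 == 1 then (p.1, max p.2 (p.1 + 1))
            else (p.1 + 1, p.2))
          (c0, b0)).2
        = (E.filterMap pvQ).foldl (fun b s => max b (1 + (c0 + pvNet s E))) b0 := by
  intro E
  induction E with
  | nil => intro _ _ c0 b0; rfl
  | cons e E ih =>
    intro hp hk c0 b0
    have hpe : ∀ e' ∈ E, e.1 < e'.1 ∨ (e.1 = e'.1 ∧ e.2 ≤ e'.2) := (List.pairwise_cons.mp hp).1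
    have hp' := (List.pairwise_cons.mp hp).2
    have hk' : ∀ e' ∈ E, e'.2 = 0 ∨ e'.2 = 1 ∨ e'.2 = 2 := fun e' h => hk e' (List.mem_cons_of_mem _ h)
    have hq : ∀ s ∈ E.filterMap pvQ, (s, (1 : Int)) ∈ E := by
      intro s hs
      rcases List.mem_filterMap.mp hs with ⟨e', he', hsome⟩
      rcases e' with ⟨a, k⟩
      simp only [pvQ] at hsome
      split_ifs at hsome with h
      · have h1 : k = 1 := by simpa using h
        have h2 : a = s := by simpa using hsome
        rw [← h1, ← h2]; exact he'
    simp only [List.foldl_cons]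
    rcases hk e (List.mem_cons_self) with h0 | h1 | h2
    · -- close event: the counter drops; every later query coordinate is ≥ e.1
      rw [if_pos (by simp [h0])]
      rw [ih hp' hk' (c0 - 1) b0]
      have hfm : (e :: E).filterMap pvQ = E.filterMap pvQ := by
        simp [pvQ, h0]
      rw [hfm]
      apply PySem.List.foldl_congr_mem'
      intro s hs acc
      have hnet : pvNet s (e :: E) = pvNet s E - 1 := by
        have hle : e.1 ≤ s := by
          rcases hpe _ (hq s hs) with hlt | ⟨heq, _⟩ <;> omega
        rw [pvNet_cons]
        simp [h0, hle]
      rw [hnet]; ring_nf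
    · -- query event: no event of E affects the counter value read here
      rw [if_neg (by simp [h1]), if_pos (by simp [h1])]
      rw [ih hp' hk' c0 (max b0 (c0 + 1))]
      have hfm : (e :: E).filterMap pvQ = e.1 :: E.filterMap pvQ := by
        simp [pvQ, h1]
      rw [hfm, List.foldl_cons]
      have hnet0 : pvNet e.1 (e :: E) = 0 := by
        rw [pvNet_cons]
        simp only [h1]
        have h2' : (E.countP (fun e' => e'.2 == 2 && decide (e'.1 < e.1)) : Nat) = 0 := by
          rw [List.countP_eq_zero]
          intro e' he' hcon
          have hcon' : e'.2 = 2 ∧ e'.1 < e.1 := by simpa using hcon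
          rcases hpe _ he' with hlt | ⟨heq, _⟩ <;> omega
        have h0' : (E.countP (fun e' => e'.2 == 0 && decide (e'.1 ≤ e.1)) : Nat) = 0 := by
          rw [List.countP_eq_zero]
          intro e' he' hcon
          have hcon' : e'.2 = 0 ∧ e'.1 ≤ e.1 := by simpa using hcon
          rcases hpe _ he' with hlt | ⟨heq, hle2⟩
          · omega
          · rw [h1] at hle2; omega
        simp [pvNet, h2', h0']
      rw [hnet0]
      have hb : max b0 (1 + (c0 + 0)) = max b0 (c0 + 1) := by omega
      rw [hb]
      apply PySem.List.foldl_congr_mem'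
      intro s hs acc
      have hnet : pvNet s (e :: E) = pvNet s E := by
        rw [pvNet_cons]; simp [h1]
      rw [hnet]
    · -- open event: the counter rises; every later query coordinate is > e.1
      rw [if_neg (by simp [h2]), if_neg (by simp [h2])]
      rw [ih hp' hk' (c0 + 1) b0]
      have hfm : (e :: E).filterMap pvQ = E.filterMap pvQ := by
        simp [pvQ, h2]
      rw [hfm]
      apply PySem.List.foldl_congr_mem'
      intro s hs acc
      have hnet : pvNet s (e :: E) = pvNet s E + 1 := by
        have hlt : e.1 < s := by
          rcases hpe _ (hq s hs) with hlt | ⟨heq, hle⟩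
          · exact hlt
          · rw [h2] at hle; simp at hle
        rw [pvNet_cons]
        simp [h2, hlt]
      rw [hnet]; ring_nf

theorem pvNet_flatMap (cs : List (Int × Int)) (s : Int) :
    pvNet s (cs.flatMap pvEv) = pvCover cs s := by
  induction cs with
  | nil => rfl
  | cons c cs ih =>
    rw [List.flatMap_cons]
    simp only [pvNet, pvCover, List.countP_append, List.countP_cons] at *
    by_cases h : c.1 < c.2 <;> simp only [pvEv, if_pos, h] <;>
      simp only [List.countP_cons, List.countP_nil] <;>
      push_cast <;>
      rcases lt_or_ge c.1 s with h1 | h1 <;> rcases le_or_gt c.2 s with h2 | h2 <;>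
      simp_all <;> omega

theorem pvQueries_flatMap (cs : List (Int × Int)) :
    (cs.flatMap pvEv).filterMap pvQ = cs.map Prod.fst := by
  induction cs with
  | nil => rfl
  | cons c cs ih =>
    rw [List.flatMap_cons, List.filterMap_append, ih, List.map_cons]
    have : (pvEv c).filterMap pvQ = [c.1] := by
      by_cases h : c.1 < c.2 <;> simp [pvEv, pvQ, h]
    rw [this]
    rfl

-- B's event list is the flat map of per-class events
theorem pvEvents_eq (cs : List (Int × Int)) :
    cs.foldl
      (fun acc c =>
        let acc := acc ++ [(c.1, (1 : Int))]
        if c.1 < c.2 then acc ++ [(c.1, (2 : Int)), (c.2, (0 : Int))] else acc)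
      []
    = cs.flatMap pvEv := by
  rw [PySem.List.foldl_congr_mem' cs _ (fun acc c => acc ++ pvEv c) [] ?_,
      PySem.List.foldl_append_eq_flatMap]
  · simp
  · intro c _ acc
    simp only [pvEv]
    split_ifs with h <;> simp

-- B = the same running max over the starts of 1 + cover
theorem pvB_char (cs : List (Int × Int)) :
    solution_alt cs = (cs.map Prod.fst).foldl (fun b s => max b (1 + pvCover cs s)) 1 := by
  show ((PySem.List.sorted _ (fun e => toLex e) false).foldl _ ((0 : Int), (1 : Int))).2 = _
  rw [pvEvents_eq]
  have hperm := PySem.List.sorted_perm (cs.flatMap pvEv) (fun e => toLex e) false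
  have hpair : (PySem.List.sorted (cs.flatMap pvEv) (fun e => toLex e) false).Pairwise
      (fun a b => a.1 < b.1 ∨ (a.1 = b.1 ∧ a.2 ≤ b.2)) := by
    have := PySem.List.sorted_pairwise (cs.flatMap pvEv) (fun e => toLex e)
    exact this.imp (fun h => Prod.Lex.toLex_le_toLex.mp h)
  have hkind : ∀ e ∈ PySem.List.sorted (cs.flatMap pvEv) (fun e => toLex e) false,
      e.2 = 0 ∨ e.2 = 1 ∨ e.2 = 2 := by
    intro e he
    rw [PySem.List.mem_sorted] at he
    rcases List.mem_flatMap.mp he with ⟨c, _, hm⟩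
    by_cases hc : c.1 < c.2
    · simp only [pvEv, if_pos hc, List.mem_cons, List.not_mem_nil, or_false] at hm
      rcases hm with rfl | rfl | rfl <;> simp
    · simp only [pvEv, if_neg hc, List.mem_cons, List.not_mem_nil, or_false] at hm
      subst hm
      simp
  rw [pvSweep _ hpair hkind 0 1]
  rw [PySem.List.foldl_congr_mem' _ _ (fun b s => max b (1 + pvCover cs s)) 1 ?_]
  · refine List.Perm.foldl_eq (rcomm := ⟨fun b x y => by omega⟩) ?_ 1
    have h1 := hperm.filterMap pvQ
    rw [pvQueries_flatMap] at h1
    exact h1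
  · intro s hs acc
    have : pvNet s (PySem.List.sorted (cs.flatMap pvEv) (fun e => toLex e) false)
        = pvCover cs s := by
      rw [← pvNet_flatMap cs s]
      simp only [pvNet]
      rw [List.Perm.countP_eq _ hperm, List.Perm.countP_eq _ hperm]
    rw [this]
    ring_nf

-- ===== VERDICT (by name: the statement is the Claim_ definition above) =====
theorem solution_spec : Claim_equal_solution := by
  intro classes _
  unfold Spec_solution
  rw [pvA_char, pvB_char]
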